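-- pv_equiv track=rewrite | github.com/DendiRob/python-class-algorithms | lab4B.py | contains_two_and_three
-- ===== SOURCE A (Python) =====
-- def contains_two_and_three(num):
--     has_two=False
--     has_three=False
--
--     while num>0:
--         digit=num%10
--         if digit==2:
--             has_two=True
--         elif digit==3:
--             has_three=True
--         num=num//10
--
--     return has_two and has_three
-- ===== SOURCE B (Python) =====
-- def contains_two_and_three(num):
--     s = str(num)
--     return num > 0 and '2' in s and '3' in s
-- ===== Notes on version B (the rewrite author's own statement) =====
-- stated objective: idiomatic
-- what changed: Replaces the digit-peeling modulo/floor-division loop with two flag accumulators by converting the number to its decimal string once and testing character membership of the two digits, guarded by positivity so non-positive inputs stay False.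
import Mathlib
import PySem

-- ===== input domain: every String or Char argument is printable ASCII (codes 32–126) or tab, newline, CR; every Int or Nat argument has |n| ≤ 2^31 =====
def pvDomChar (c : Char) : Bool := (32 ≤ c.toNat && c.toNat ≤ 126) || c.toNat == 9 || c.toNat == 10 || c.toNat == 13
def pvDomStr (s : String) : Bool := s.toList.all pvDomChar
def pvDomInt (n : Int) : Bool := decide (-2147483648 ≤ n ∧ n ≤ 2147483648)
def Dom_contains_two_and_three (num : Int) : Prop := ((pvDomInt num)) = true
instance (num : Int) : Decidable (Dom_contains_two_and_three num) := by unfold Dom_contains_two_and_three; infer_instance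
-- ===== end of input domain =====

-- B converts the number to its decimal string and tests character membership instead of peeling digits with %10//10 into two flags; same result, idiomatic.

-- ===== PORT A =====
-- the while-loop of A: state (has_two, has_three), condition num > 0
def twoThreeLoop (num : Int) (has_two has_three : Bool) : Bool :=
  if h : 0 < num then
    let digit := PySem.Int.mod num 10
    if digit = 2 then twoThreeLoop (PySem.Int.floordiv num 10) true has_three
    else if digit = 3 then twoThreeLoop (PySem.Int.floordiv num 10) has_two true
    else twoThreeLoop (PySem.Int.floordiv num 10) has_two has_three
  else has_two && has_three
termination_by num.toNat
decreasing_by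
  all_goals
    rw [PySem.Int.floordiv_eq_ediv_of_pos (by omega : (0:Int) < 10)]
    omega

def contains_two_and_three (num : Int) : Bool := twoThreeLoop num false false

-- ===== PORT B =====
def contains_two_and_three_alt (num : Int) : Bool :=
  let s := PySem.Int.toStr num
  decide (0 < num) && PySem.Str.isIn "2" s && PySem.Str.isIn "3" s

-- ===== PRECONDITION & SPEC =====
def Spec_contains_two_and_three (num : Int) (out : Bool) : Prop := out = contains_two_and_three_alt num
instance (num : Int) (out : Bool) : Decidable (Spec_contains_two_and_three num out) := by unfold Spec_contains_two_and_three; infer_instance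

-- ===== CLAIM (what is proved, stated in full; the proofs are below) =====
def Claim_equal_contains_two_and_three : Prop := ∀ (num : Int), Dom_contains_two_and_three num → Spec_contains_two_and_three num (contains_two_and_three num)

-- ===== LEMMAS AND PROOFS =====

-- A's loop computes: each flag ends true iff it started true or the digit occurs in num's digits
lemma twoThreeLoop_eq (num : Int) (h2 h3 : Bool) :
    twoThreeLoop num h2 h3 =
      ((h2 || decide (2 ∈ Nat.digits 10 num.toNat)) &&
       (h3 || decide (3 ∈ Nat.digits 10 num.toNat))) := by
  fun_induction twoThreeLoop num h2 h3 with
  | case1 num h2 h3 hpos digit hd ih =>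
    have hq : (PySem.Int.floordiv num 10).toNat = num.toNat / 10 := by
      rw [PySem.Int.floordiv_eq_ediv_of_pos (by omega : (0:Int) < 10)]; omega
    have hd' : PySem.Int.mod num 10 = 2 := hd
    have hm : num.toNat % 10 = 2 := by
      rw [PySem.Int.mod_eq_emod_of_pos (by omega : (0:Int) < 10)] at hd'; omega
    rw [ih, hq, Nat.digits_def' (by norm_num : 1 < 10) (by omega : 0 < num.toNat), hm]
    simp
  | case2 num h2 h3 hpos digit hne2 heq3 ih =>
    have hq : (PySem.Int.floordiv num 10).toNat = num.toNat / 10 := by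
      rw [PySem.Int.floordiv_eq_ediv_of_pos (by omega : (0:Int) < 10)]; omega
    have hd' : PySem.Int.mod num 10 = 3 := heq3
    have hm : num.toNat % 10 = 3 := by
      rw [PySem.Int.mod_eq_emod_of_pos (by omega : (0:Int) < 10)] at hd'; omega
    rw [ih, hq, Nat.digits_def' (by norm_num : 1 < 10) (by omega : 0 < num.toNat), hm]
    simp
  | case3 num h2 h3 hpos digit hne2 hne3 ih =>
    have hq : (PySem.Int.floordiv num 10).toNat = num.toNat / 10 := by
      rw [PySem.Int.floordiv_eq_ediv_of_pos (by omega : (0:Int) < 10)]; omega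
    have hd2 : PySem.Int.mod num 10 ≠ 2 := hne2
    have hd3 : PySem.Int.mod num 10 ≠ 3 := hne3
    rw [PySem.Int.mod_eq_emod_of_pos (by omega : (0:Int) < 10)] at hd2 hd3
    have hm2 : num.toNat % 10 ≠ 2 := by omega
    have hm3 : num.toNat % 10 ≠ 3 := by omega
    rw [ih, hq, Nat.digits_def' (by norm_num : 1 < 10) (by omega : 0 < num.toNat)]
    simp [Ne.symm hm2, Ne.symm hm3]
  | case4 num h2 h3 hneg =>
    have : num.toNat = 0 := by omega
    simp [this]

lemma toDigitsCore_eq (f : Nat) : ∀ (n : Nat) (ds : List Char), 0 < n → n < 10 ^ f →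
    Nat.toDigitsCore 10 f n ds = (Nat.digits 10 n).reverse.map Nat.digitChar ++ ds := by
  induction f with
  | zero => intro n ds h1 h2; simp at h2; omega
  | succ f ih =>
    intro n ds h1 h2
    rw [Nat.toDigitsCore]
    by_cases h : n / 10 = 0
    · have hd : Nat.digits 10 n = [n % 10] := by
        rw [Nat.digits_def' (by norm_num : 1 < 10) h1, h]; simp
      simp [h, hd]
    · have hq : 0 < n / 10 := Nat.pos_of_ne_zero h
      have hlt : n / 10 < 10 ^ f := by
        rw [Nat.div_lt_iff_lt_mul (by norm_num : 0 < 10)]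
        calc n < 10 ^ (f + 1) := h2
        _ = 10 ^ f * 10 := by ring
      simp only [h, if_false]
      rw [ih (n / 10) _ hq hlt, Nat.digits_def' (by norm_num : 1 < 10) h1]
      simp

lemma mem_toDigits_iff (n d : Nat) (hn : 0 < n) (hd : d < 10) :
    Nat.digitChar d ∈ Nat.toDigits 10 n ↔ d ∈ Nat.digits 10 n := by
  have hfuel : n < 10 ^ (n + 1) := by
    calc n < 10 ^ n := Nat.lt_pow_self (by norm_num)
    _ ≤ 10 ^ (n + 1) := Nat.pow_le_pow_right (by norm_num) (Nat.le_succ n)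
  rw [Nat.toDigits, toDigitsCore_eq (n + 1) n [] hn hfuel]
  simp only [List.append_nil, List.mem_map, List.mem_reverse]
  constructor
  · rintro ⟨a, ha, he⟩
    have ha10 : a < 10 := Nat.digits_lt_base (by norm_num) ha
    interval_cases d <;> interval_cases a <;> first | exact ha | exact absurd he (by decide)
  · intro hmem; exact ⟨d, hmem, rfl⟩

lemma singleton_infix {α : Type} (a : α) (l : List α) : [a] <:+: l ↔ a ∈ l := by
  constructor
  · intro h; exact h.sublist.subset (List.mem_singleton_self a)
  · intro h
    obtain ⟨s, t, rfl⟩ := List.append_of_mem h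
    exact ⟨s, t, by simp⟩

lemma isIn_digit_eq (num : Int) (hpos : 0 < num) (d : Nat) (hd : d < 10)
    (c : String) (hc : c.toList = [Nat.digitChar d]) :
    PySem.Str.isIn c (PySem.Int.toStr num) = decide (d ∈ Nat.digits 10 num.toNat) := by
  have htc : (PySem.Int.toStr num).toList = Nat.toDigits 10 num.toNat := by
    rw [PySem.Int.toList_toStr, PySem.Int.toChars]
    simp [not_lt.mpr (le_of_lt hpos)]
  rw [Bool.eq_iff_iff, PySem.Str.isIn_iff_infix, hc, htc, singleton_infix,
    mem_toDigits_iff num.toNat d (by omega) hd, decide_eq_true_iff]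

lemma alt_eq (num : Int) :
    contains_two_and_three_alt num =
      ((decide (0 < num) && decide (2 ∈ Nat.digits 10 num.toNat)) &&
       decide (3 ∈ Nat.digits 10 num.toNat)) := by
  rw [show contains_two_and_three_alt num =
      (decide (0 < num) && PySem.Str.isIn "2" (PySem.Int.toStr num) &&
       PySem.Str.isIn "3" (PySem.Int.toStr num)) from rfl]
  by_cases hpos : 0 < num
  · rw [isIn_digit_eq num hpos 2 (by norm_num) "2" rfl,
      isIn_digit_eq num hpos 3 (by norm_num) "3" rfl]
  · simp [hpos]

-- ===== VERDICT (by name: the statement is the Claim_ definition above) =====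
theorem contains_two_and_three_spec : Claim_equal_contains_two_and_three := by
  intro num _
  unfold Spec_contains_two_and_three contains_two_and_three
  rw [twoThreeLoop_eq, alt_eq]
  by_cases hpos : 0 < num
  · simp [hpos]
  · have : num.toNat = 0 := by omega
    simp [hpos, this]
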